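-- pv_equiv track=rewrite | github.com/dtauraso/graphics | tic_tac_toe.py | playerStreakMeasure
-- ===== SOURCE A (Python) =====
-- def playerStreakMeasure(streak_list):
--
--     '''
--         This function determines if a player won or not.
--
--         assumptions:
--         streak_list has been made
--
--         input:
--         streak_list
--
--         output:
--         True or False
--     '''
--
--     player_one_total = 0
--     player_two_total = 0
--     for item in streak_list:
--
--         # Count the number of 1's.
--         if item == 1:
--
--             player_one_total = player_one_total + 1
--
--         # Count the number of 2's.
--         if item == 2:
--
--             player_two_total = player_two_total + 1
--
--     # Check if either player won.
--     if player_one_total == len(streak_list):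
--
--         return True
--
--     elif player_two_total == len(streak_list):
--
--         return True
--
--     else:
--
--         return False
-- ===== SOURCE B (Python) =====
-- def playerStreakMeasure(streak_list):
--     s = set(streak_list)
--     return s <= {1} or s <= {2}
-- ===== Notes on version B (the rewrite author's own statement) =====
-- stated objective: simpler
-- what changed: Replaced the two per-player counters and length comparisons with a distinct-value set and two subset tests (s <= {1} or s <= {2}).
import Mathlib
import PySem

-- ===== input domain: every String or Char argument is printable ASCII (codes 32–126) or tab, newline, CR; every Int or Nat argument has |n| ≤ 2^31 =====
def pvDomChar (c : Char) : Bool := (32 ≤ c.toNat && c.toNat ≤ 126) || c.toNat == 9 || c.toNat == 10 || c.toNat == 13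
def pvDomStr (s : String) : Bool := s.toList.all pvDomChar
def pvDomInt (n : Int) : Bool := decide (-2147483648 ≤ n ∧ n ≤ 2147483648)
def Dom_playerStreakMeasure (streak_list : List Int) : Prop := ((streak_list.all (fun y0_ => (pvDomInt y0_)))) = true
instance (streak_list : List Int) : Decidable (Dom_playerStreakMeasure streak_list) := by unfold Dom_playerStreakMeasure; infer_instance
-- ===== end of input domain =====

-- B replaces A's two per-player counters and length comparisons with a distinct-value set and two subset tests (simpler, same return value).


-- ===== PORT A =====
-- Port of A: counting loop over two totals, then length comparisons.
def playerStreakMeasure (streak_list : List Int) : Bool :=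
  let t := streak_list.foldl
    (fun (p : Int × Int) item =>
      (if item == 1 then p.1 + 1 else p.1,
       if item == 2 then p.2 + 1 else p.2)) (0, 0)
  if t.1 == (streak_list.length : Int) then true
  else if t.2 == (streak_list.length : Int) then true
  else false

-- ===== PORT B =====
-- Port of B: s = set(streak_list); return s <= {1} or s <= {2}.
def playerStreakMeasure_alt (streak_list : List Int) : Bool :=
  let s := PySem.Set.ofList streak_list
  PySem.Set.issubset s ([1] : List Int) || PySem.Set.issubset s ([2] : List Int)

-- ===== PRECONDITION & SPEC =====
def Spec_playerStreakMeasure (streak_list : List Int) (out : Bool) : Prop := out = playerStreakMeasure_alt streak_list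
instance (streak_list : List Int) (out : Bool) : Decidable (Spec_playerStreakMeasure streak_list out) := by unfold Spec_playerStreakMeasure; infer_instance

-- ===== CLAIM (what is proved, stated in full; the proofs are below) =====
def Claim_equal_playerStreakMeasure : Prop := ∀ (streak_list : List Int), Dom_playerStreakMeasure streak_list → Spec_playerStreakMeasure streak_list (playerStreakMeasure streak_list)

-- ===== LEMMAS AND PROOFS =====

-- ===== VERDICT (by name: the statement is the Claim_ definition above) =====

lemma foldl_counts (xs : List Int) (a b : Int) :
    xs.foldl (fun (p : Int × Int) item =>
      (if item == 1 then p.1 + 1 else p.1,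
       if item == 2 then p.2 + 1 else p.2)) (a, b)
    = (a + (xs.countP (· == 1) : Int), b + (xs.countP (· == 2) : Int)) := by
  induction xs generalizing a b with
  | nil => simp
  | cons x xs ih =>
    simp only [List.foldl_cons, List.countP_cons, ih]
    by_cases h1 : x = 1 <;> by_cases h2 : x = 2 <;>
      simp [h1, h2] <;> ring

lemma a_eval (xs : List Int) :
    playerStreakMeasure xs = ((decide (∀ x ∈ xs, x = 1)) || (decide (∀ x ∈ xs, x = 2))) := by
  have c1 : ((xs.countP (· == 1) : Int) = (xs.length : Int)) ↔ ∀ x ∈ xs, x = 1 := by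
    rw [Int.natCast_inj, List.countP_eq_length]
    simp only [beq_iff_eq]
  have c2 : ((xs.countP (· == 2) : Int) = (xs.length : Int)) ↔ ∀ x ∈ xs, x = 2 := by
    rw [Int.natCast_inj, List.countP_eq_length]
    simp only [beq_iff_eq]
  unfold playerStreakMeasure
  rw [foldl_counts]
  simp only [beq_iff_eq, zero_add]
  split_ifs with h1 h2
  · symm; simp only [Bool.or_eq_true, decide_eq_true_eq]; exact Or.inl (c1.mp h1)
  · symm; simp only [Bool.or_eq_true, decide_eq_true_eq]; exact Or.inr (c2.mp h2)
  · simp only [Bool.or_eq_false_iff, decide_eq_false_iff_not, eq_comm (a := false)]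
    exact ⟨mt c1.mpr h1, mt c2.mpr h2⟩

lemma b_eval (xs : List Int) :
    playerStreakMeasure_alt xs = ((decide (∀ x ∈ xs, x = 1)) || (decide (∀ x ∈ xs, x = 2))) := by
  unfold playerStreakMeasure_alt
  have s1 : PySem.Set.issubset (PySem.Set.ofList xs) ([1] : List Int)
      = decide (∀ x ∈ xs, x = 1) := by
    rw [Bool.eq_iff_iff, PySem.Set.issubset_iff]
    simp only [PySem.Set.mem_ofList, List.mem_singleton, decide_eq_true_eq]
  have s2 : PySem.Set.issubset (PySem.Set.ofList xs) ([2] : List Int)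
      = decide (∀ x ∈ xs, x = 2) := by
    rw [Bool.eq_iff_iff, PySem.Set.issubset_iff]
    simp only [PySem.Set.mem_ofList, List.mem_singleton, decide_eq_true_eq]
  simp only []
  rw [s1, s2]

-- ===== VERDICT =====
theorem playerStreakMeasure_spec : Claim_equal_playerStreakMeasure := by
  intro xs _
  unfold Spec_playerStreakMeasure
  rw [a_eval, b_eval]
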